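-- pv_equiv track=rewrite | github.com/kusodama21/ain-15-puzzle-solver | charge_pd.py | to_ps
-- ===== SOURCE A (Python) =====
-- def to_ps(data, re):
--     cl = []  # Component list, which later will be converted to pattern string
--
--     fst_re = True  # The first component is expected to be relevant, this will turn false after the first iteration
--     irr_pended = False  # Check if there are irrelevant tiles before the current process relevant tile
--     irr_num = 0  # The number of irrelevant tiles pended
--
--     for tile in data:
--         if tile in re:
--             if irr_pended:
--                 if fst_re:
--                     fst_re = False
--
--                 cl.append("i" + str(irr_num))
--                 irr_pended = False
--                 irr_num = 0
--             if fst_re: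
--                 cl.append(str(tile))
--                 fst_re = False
--             else:
--                 cl.append("." + str(tile))
--         else:
--             irr_num += 1
--             if not irr_pended:
--                 irr_pended = True
--
--     # Last check since the ending tile may not be relevant, as it will not pend the irrelevant tiles at the end
--     if irr_pended:
--         cl.append("i" + str(irr_num))
--
--     return "".join(cl)
-- ===== SOURCE B (Python) =====
-- def to_ps(data, re):
--     parts = []
--     i, n = 0, len(data)
--     while i < n:
--         if data[i] in re:
--             # only the tile at index 0 (when relevant) lacks a leading dot
--             parts.append(("" if i == 0 else ".") + str(data[i]))
--             i += 1
--         else: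
--             j = i + 1
--             while j < n and data[j] not in re:
--                 j += 1
--             parts.append("i" + str(j - i))
--             i = j
--     return "".join(parts)
-- ===== Notes on version B (the rewrite author's own statement) =====
-- stated objective: simpler
-- what changed: Replaced A's fst_re/irr_pended/irr_num state machine by a run-scanning loop: each maximal irrelevant run is measured by an inner scan and emitted as one 'i<len>' part, and a relevant tile gets a leading dot exactly when its index is nonzero.
import Mathlib
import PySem

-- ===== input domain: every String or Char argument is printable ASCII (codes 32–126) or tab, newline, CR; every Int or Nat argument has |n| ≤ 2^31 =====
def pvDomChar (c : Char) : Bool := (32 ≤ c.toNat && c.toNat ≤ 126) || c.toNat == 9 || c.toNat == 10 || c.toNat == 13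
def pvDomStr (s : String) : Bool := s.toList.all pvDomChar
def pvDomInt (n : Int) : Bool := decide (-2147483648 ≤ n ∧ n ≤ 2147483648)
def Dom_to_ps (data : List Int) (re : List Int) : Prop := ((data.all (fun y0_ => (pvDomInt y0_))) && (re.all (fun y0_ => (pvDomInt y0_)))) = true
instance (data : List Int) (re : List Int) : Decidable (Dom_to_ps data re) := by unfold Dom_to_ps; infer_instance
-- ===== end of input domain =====

-- B replaces A's three-variable state machine by a run-scanning loop (objective: simpler); same return value on all inputs.

-- ===== PORT A =====
-- state = (cl, fst_re, irr_pended, irr_num), exactly A's loop variables; stepA is A's loop body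
def stepA (re : List Int) (st : List String × Bool × Bool × Int) (tile : Int) :
    List String × Bool × Bool × Int :=
  let (cl, fst_re, irr_pended, irr_num) := st
  if re.contains tile then
    -- 'if irr_pended: (if fst_re: fst_re = False); append "i"+str(irr_num); reset'
    let (cl, fst_re, irr_pended, irr_num) :=
      if irr_pended then
        (cl ++ ["i" ++ PySem.Int.toStr irr_num], false, false, (0 : Int))
      else (cl, fst_re, irr_pended, irr_num)
    if fst_re then
      (cl ++ [PySem.Int.toStr tile], false, irr_pended, irr_num)
    else
      (cl ++ ["." ++ PySem.Int.toStr tile], fst_re, irr_pended, irr_num)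
  else
    (cl, fst_re, true, irr_num + 1)

-- the trailing 'if irr_pended: cl.append("i"+str(irr_num))'
def finA (st : List String × Bool × Bool × Int) : List String :=
  if st.2.2.1 then st.1 ++ ["i" ++ PySem.Int.toStr st.2.2.2] else st.1

def to_ps (data : List Int) (re : List Int) : String :=
  String.join (finA (data.foldl (stepA re) ([], true, false, 0)))

-- ===== PORT B =====
-- inner 'while j < n and data[j] not in re' of Source B: length of the leading run of rest not in re
def irrLen (re : List Int) : List Int → Nat
  | [] => 0
  | t :: rest => if re.contains t then 0 else 1 + irrLen re rest

theorem irrLen_le (re : List Int) (l : List Int) : irrLen re l ≤ l.length := by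
  induction l with
  | nil => simp [irrLen]
  | cons t rest ih =>
    simp only [irrLen, List.length_cons]
    split <;> omega

-- Source B's outer while over index i, transcribed as recursion on the suffix data[i:];
-- 'first' is the test 'i == 0'.  When data[i] ∉ re, j - i = 1 + irrLen re rest and
-- data[j:] = rest.drop (irrLen re rest).
def goB (re : List Int) : List Int → Bool → List String
  | [], _ => []
  | t :: rest, first =>
    if re.contains t then
      ((if first then "" else ".") ++ PySem.Int.toStr t) :: goB re rest false
    else
      ("i" ++ PySem.Int.toStr (1 + (irrLen re rest : Int))) ::
        goB re (rest.drop (irrLen re rest)) false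
termination_by l => l.length
decreasing_by
  all_goals simp only [List.length_cons, List.length_drop]
  all_goals (have := irrLen_le re rest; omega)

def to_ps_alt (data : List Int) (re : List Int) : String :=
  String.join (goB re data true)

-- ===== PRECONDITION & SPEC =====
def Spec_to_ps (data : List Int) (re : List Int) (out : String) : Prop := out = to_ps_alt data re
instance (data : List Int) (re : List Int) (out : String) : Decidable (Spec_to_ps data re out) := by unfold Spec_to_ps; infer_instance

-- ===== CLAIM (what is proved, stated in full; the proofs are below) =====
def Claim_equal_to_ps : Prop := ∀ (data : List Int) (re : List Int), Dom_to_ps data re → Spec_to_ps data re (to_ps data re)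

-- ===== LEMMAS AND PROOFS =====

-- A's continuation: the components A will still emit from state (fst, p, n) on the remaining input
def G (re : List Int) (fst p : Bool) (n : Int) : List Int → List String
  | [] => if p then ["i" ++ PySem.Int.toStr n] else []
  | t :: rest =>
    if re.contains t then
      if p then
        ("i" ++ PySem.Int.toStr n) :: ("." ++ PySem.Int.toStr t) :: G re false false 0 rest
      else if fst then
        PySem.Int.toStr t :: G re false false n rest
      else
        ("." ++ PySem.Int.toStr t) :: G re fst false n rest
    else G re fst true (n + 1) rest

-- A's fold, finished, equals the already-emitted components plus the continuation
theorem loopA_G (re : List Int) (rest : List Int) :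
    ∀ (cl : List String) (fst p : Bool) (n : Int),
      finA (rest.foldl (stepA re) (cl, fst, p, n)) = cl ++ G re fst p n rest := by
  induction rest with
  | nil =>
    intro cl fst p n
    simp only [List.foldl_nil, G, finA]
    split <;> simp
  | cons t rest ih =>
    intro cl fst p n
    simp only [List.foldl_cons]
    by_cases hc : t ∈ re
    · by_cases hp : p <;> by_cases hf : fst <;>
        simp [stepA, G, hc, hp, hf, ih, List.append_assoc]
    · simp only [stepA]
      rw [if_neg (by simpa using hc), ih cl fst true (n + 1)]
      simp only [G]
      rw [if_neg (by simpa using hc)]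

-- mutual characterisation of the continuation by goB, by strong induction on the list
theorem G_goB_aux (re : List Int) : ∀ (k : Nat) (rest : List Int), rest.length ≤ k →
    (∀ fst, G re fst false 0 rest = goB re rest fst) ∧
    (∀ fst (n : Int), G re fst true n rest =
      ("i" ++ PySem.Int.toStr (n + (irrLen re rest : Int))) ::
        goB re (rest.drop (irrLen re rest)) false) := by
  intro k
  induction k with
  | zero =>
    intro rest h
    have hrest : rest = [] := by cases rest <;> simp_all
    subst hrest
    constructor
    · intro fst; simp [G, goB]
    · intro fst n; simp [G, goB, irrLen]
  | succ k ih =>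
  intro rest h
  match rest with
  | [] =>
    constructor
    · intro fst; simp [G, goB]
    · intro fst n; simp [G, goB, irrLen]
  | t :: rest =>
    have ihr := ih rest (by simp only [List.length_cons] at h; omega)
    constructor
    · intro fst
      by_cases hc : re.contains t
      · simp only [G, goB, hc, if_true]
        by_cases hf : fst <;> simp [hf, ihr.1]
      · have h1 := ihr.2 fst 1
        simp only [G, goB, hc, Bool.false_eq_true, if_false, zero_add]
        exact h1
    · intro fst n
      by_cases hc : re.contains t
      · simp only [G, goB, hc, if_true, irrLen, List.drop_zero]
        simp [ihr.1]
      · simp only [G, hc, irrLen, Bool.false_eq_true, if_false]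
        rw [ihr.2 fst (n + 1),
          show 1 + irrLen re rest = irrLen re rest + 1 from Nat.add_comm 1 _,
          List.drop_succ_cons]
        congr 3
        push_cast
        ring

theorem G_goB (re : List Int) (rest : List Int) :
    (∀ fst, G re fst false 0 rest = goB re rest fst) ∧
    (∀ fst (n : Int), G re fst true n rest =
      ("i" ++ PySem.Int.toStr (n + (irrLen re rest : Int))) ::
        goB re (rest.drop (irrLen re rest)) false) :=
  G_goB_aux re rest.length rest le_rfl

-- ===== VERDICT (by name: the statement is the Claim_ definition above) =====
theorem to_ps_spec : Claim_equal_to_ps := by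
  intro data re _
  show to_ps data re = to_ps_alt data re
  unfold to_ps to_ps_alt
  rw [loopA_G re data [] true false 0, List.nil_append, (G_goB re data).1 true]
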